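-- pv_equiv track=rewrite | github.com/ohwoo-kwon/algorithm | baekjun/5671.py | check_room_num
-- ===== SOURCE A (Python) =====
-- def check_room_num(room_num):
--     nums = [0] * 10
--     while room_num > 0:
--         num = room_num % 10
--         room_num = room_num // 10
--         nums[num] += 1
--         if nums[num] > 1:
--             return False
--     return True
-- ===== SOURCE B (Python) =====
-- def check_room_num(room_num):
--     def go(n, seen):
--         if n <= 0:
--             return True
--         bit = 1 << (n % 10)
--         if seen & bit:
--             return False
--         return go(n // 10, seen | bit)
--     return go(room_num, 0)
-- ===== Notes on version B (the rewrite author's own statement) =====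
-- stated objective: alternative
-- what changed: Recursive descent carrying a bitmask integer of digits seen so far (set/test by shift, and, or) instead of an iterative loop over a 10-slot count array.
import Mathlib
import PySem

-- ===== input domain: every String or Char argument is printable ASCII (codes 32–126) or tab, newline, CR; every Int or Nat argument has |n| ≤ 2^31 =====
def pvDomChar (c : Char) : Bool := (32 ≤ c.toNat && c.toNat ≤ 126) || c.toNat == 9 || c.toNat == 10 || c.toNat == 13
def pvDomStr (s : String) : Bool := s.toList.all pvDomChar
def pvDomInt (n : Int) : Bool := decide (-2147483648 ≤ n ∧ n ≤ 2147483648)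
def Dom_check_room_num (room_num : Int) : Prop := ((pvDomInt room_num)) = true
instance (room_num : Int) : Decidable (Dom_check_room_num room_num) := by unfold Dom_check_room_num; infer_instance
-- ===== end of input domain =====

-- B checks digit distinctness by a recursive descent carrying a bitmask integer of
-- digits seen so far, instead of A's iterative loop over a 10-slot count array (alternative).


-- termination helper for the digit-extraction loops (cited by name in decreasing_by)
theorem pvFloordivTenLt (n : Int) (h : 0 < n) : (PySem.Int.floordiv n 10).toNat < n.toNat := by
  rw [PySem.Int.floordiv_eq_ediv_of_pos (by norm_num)]
  omega

-- ===== PORT A =====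
-- the while loop of A, carrying the 10-slot count array
def checkRoomLoopA (n : Int) (nums : List Int) : Bool :=
  if h : 0 < n then
    let num := PySem.Int.mod n 10
    let n' := PySem.Int.floordiv n 10
    let nums' := PySem.List.pySetD nums num (PySem.List.pyGetD nums num 0 + 1)
    if PySem.List.pyGetD nums' num 0 > 1 then false
    else checkRoomLoopA n' nums'
  else true
termination_by n.toNat
decreasing_by exact pvFloordivTenLt n h

def check_room_num (room_num : Int) : Bool :=
  checkRoomLoopA room_num (List.replicate 10 0)

-- ===== PORT B =====
-- B's inner recursive helper 'go'; 'seen' is Python's nonnegative bitmask int,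
-- represented exactly by a Nat (it is 0 ||| powers of two throughout)
def goB (n : Int) (seen : Nat) : Bool :=
  if h : 0 < n then
    let bit := 1 <<< (PySem.Int.mod n 10).toNat
    if seen &&& bit ≠ 0 then false
    else goB (PySem.Int.floordiv n 10) (seen ||| bit)
  else true
termination_by n.toNat
decreasing_by exact pvFloordivTenLt n h

def check_room_num_alt (room_num : Int) : Bool :=
  goB room_num 0

-- ===== PRECONDITION & SPEC =====
def Spec_check_room_num (room_num : Int) (out : Bool) : Prop := out = check_room_num_alt room_num
instance (room_num : Int) (out : Bool) : Decidable (Spec_check_room_num room_num out) := by unfold Spec_check_room_num; infer_instance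

-- ===== CLAIM (what is proved, stated in full; the proofs are below) =====
def Claim_equal_check_room_num : Prop := ∀ (room_num : Int), Dom_check_room_num room_num → Spec_check_room_num room_num (check_room_num room_num)

-- ===== LEMMAS AND PROOFS =====

-- strong induction on the toNat of an integer
theorem pvIntStrongInd (motive : Int → Prop)
    (step : ∀ n, (∀ m : Int, m.toNat < n.toNat → motive m) → motive n) : ∀ n, motive n := by
  intro n
  generalize hk : n.toNat = k
  induction k using Nat.strong_induction_on generalizing n with
  | _ k ih => exact step n (fun m hm => ih m.toNat (hk ▸ hm) m rfl)

-- the digit list of n (least significant first), proof-side reference object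
def pvDigs (n : Int) : List Int :=
  if h : 0 < n then PySem.Int.mod n 10 :: pvDigs (PySem.Int.floordiv n 10) else []
termination_by n.toNat
decreasing_by exact pvFloordivTenLt n h

theorem pvDigs_mem_bounds (n : Int) : ∀ d ∈ pvDigs n, 0 ≤ d ∧ d < 10 := by
  induction n using pvIntStrongInd with
  | step n ih =>
    unfold pvDigs
    split
    · rename_i h
      intro d hd
      rcases List.mem_cons.mp hd with h1 | h2
      · subst h1
        have h1 := PySem.Int.mod_nonneg n (b := 10) (by norm_num)
        have h2 := PySem.Int.mod_lt n (b := 10) (by norm_num)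
        omega
      · exact ih _ (pvFloordivTenLt n h) d h2
    · intro d hd; simp at hd

-- zero count array reads 0 at every index
theorem pvGetD_replicate_zero (d : Int) :
    PySem.List.pyGetD (List.replicate 10 (0 : Int)) d 0 = 0 := by
  rcases h : PySem.List.pyGet? (List.replicate 10 (0 : Int)) d with _ | v
  · exact PySem.List.pyGetD_of_none _ _ _ h
  · have hv := PySem.List.mem_of_pyGet?_eq_some _ h
    simp only [PySem.List.pyGetD, h, Option.getD_some]
    exact List.eq_of_mem_replicate hv

-- characterisation of A's loop
theorem checkRoomLoopA_char (n : Int) : ∀ nums : List Int, nums.length = 10 →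
    (∀ x ∈ nums, 0 ≤ x) →
    (checkRoomLoopA n nums = true ↔
      (pvDigs n).Nodup ∧ ∀ d ∈ pvDigs n, PySem.List.pyGetD nums d 0 = 0) := by
  induction n using pvIntStrongInd with
  | step n ih =>
    intro nums hlen hpos
    unfold checkRoomLoopA
    rw [pvDigs]
    split
    · rename_i h
      have hd0 := PySem.Int.mod_nonneg n (b := 10) (by norm_num)
      have hd10 := PySem.Int.mod_lt n (b := 10) (by norm_num)
      set d := PySem.Int.mod n 10 with hd
      set n' := PySem.Int.floordiv n 10 with hn'
      have hdlt : d.toNat < nums.length := by omega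
      have hget : PySem.List.pyGetD nums d 0 = nums[d.toNat] :=
        PySem.List.pyGetD_eq_getElem nums 0 (by omega) (by omega)
      have hdn0 : 0 ≤ PySem.List.pyGetD nums d 0 := by
        rw [hget]; exact hpos _ (List.getElem_mem _)
      have hset : PySem.List.pySetD nums d (PySem.List.pyGetD nums d 0 + 1)
          = nums.set d.toNat (PySem.List.pyGetD nums d 0 + 1) :=
        PySem.List.pySetD_of_nonneg nums _ (by omega)
      have hget' : ∀ e : Int, 0 ≤ e → e < 10 →
          PySem.List.pyGetD (nums.set d.toNat (PySem.List.pyGetD nums d 0 + 1)) e 0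
            = if e = d then PySem.List.pyGetD nums d 0 + 1 else PySem.List.pyGetD nums e 0 := by
        intro e he0 he10
        rw [PySem.List.pyGetD_eq_getElem _ 0 (by omega) (by simp; omega)]
        rw [List.getElem_set]
        by_cases hc : e = d
        · simp [hc]
        · have : ¬ d.toNat = e.toNat := by omega
          rw [if_neg this, if_neg hc]
          exact (PySem.List.pyGetD_eq_getElem nums 0 (by omega) (by omega)).symm
      simp only [hset]
      rw [hget' d hd0 hd10, if_pos rfl]
      by_cases hz : PySem.List.pyGetD nums d 0 = 0
      · rw [if_neg (by omega)]
        have hlen' : (nums.set d.toNat (PySem.List.pyGetD nums d 0 + 1)).length = 10 := by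
          simp [hlen]
        have hpos' : ∀ x ∈ nums.set d.toNat (PySem.List.pyGetD nums d 0 + 1), 0 ≤ x := by
          intro x hx
          rcases List.mem_or_eq_of_mem_set hx with hx' | rfl
          · exact hpos x hx'
          · omega
        rw [ih n' (pvFloordivTenLt n h) _ hlen' hpos']
        constructor
        · rintro ⟨hnd, hall⟩
          have hdnot : d ∉ pvDigs n' := by
            intro hc
            have := hall d hc
            rw [hget' d hd0 hd10, if_pos rfl] at this
            omega
          refine ⟨List.nodup_cons.mpr ⟨hdnot, hnd⟩, ?_⟩
          intro e he
          rcases List.mem_cons.mp he with rfl | he'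
          · exact hz
          · obtain ⟨he0, he10⟩ := pvDigs_mem_bounds n' e he'
            have hne : e ≠ d := fun hc => hdnot (hc ▸ he')
            have := hall e he'
            rwa [hget' e he0 he10, if_neg hne] at this
        · rintro ⟨hnd, hall⟩
          obtain ⟨hdnot, hnd'⟩ := List.nodup_cons.mp hnd
          refine ⟨hnd', ?_⟩
          intro e he'
          obtain ⟨he0, he10⟩ := pvDigs_mem_bounds n' e he'
          have hne : e ≠ d := fun hc => hdnot (hc ▸ he')
          rw [hget' e he0 he10, if_neg hne]
          exact hall e (List.mem_cons_of_mem _ he')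
      · rw [if_pos (by omega)]
        constructor
        · intro hh; exact absurd hh (by simp)
        · rintro ⟨_, hall⟩
          exact absurd (hall d (List.mem_cons_self ..)) hz
    · simp

-- and-with-power-of-two tests the bit
theorem pvAndPowNeZero (seen : Nat) (k : Nat) :
    (seen &&& (1 <<< k) ≠ 0) ↔ seen.testBit k = true := by
  rw [Nat.shiftLeft_eq, one_mul, Nat.and_two_pow]
  rcases seen.testBit k <;> simp

-- characterisation of B's recursion
theorem goB_char (n : Int) : ∀ seen : Nat,
    (goB n seen = true ↔
      (pvDigs n).Nodup ∧ ∀ d ∈ pvDigs n, seen.testBit d.toNat = false) := by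
  induction n using pvIntStrongInd with
  | step n ih =>
    intro seen
    unfold goB
    rw [pvDigs]
    split
    · rename_i h
      have hd0 := PySem.Int.mod_nonneg n (b := 10) (by norm_num)
      have hd10 := PySem.Int.mod_lt n (b := 10) (by norm_num)
      set d := PySem.Int.mod n 10 with hd
      set n' := PySem.Int.floordiv n 10 with hn'
      simp only [pvAndPowNeZero seen d.toNat]
      by_cases hz : seen.testBit d.toNat = true
      · rw [if_pos hz]
        constructor
        · intro hh; exact absurd hh (by simp)
        · rintro ⟨_, hall⟩
          exact absurd (hall d (List.mem_cons_self ..)) (by simp [hz])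
      · rw [if_neg hz]
        rw [ih n' (pvFloordivTenLt n h)]
        have hor : ∀ e : Int, 0 ≤ e → e < 10 →
            ((seen ||| 1 <<< d.toNat).testBit e.toNat
              = (seen.testBit e.toNat || decide (e = d))) := by
          intro e he0 he10
          rw [Nat.testBit_or, Nat.shiftLeft_eq, one_mul, Nat.testBit_two_pow]
          have : (d.toNat = e.toNat) ↔ (e = d) := by omega
          simp [this]
        constructor
        · rintro ⟨hnd, hall⟩
          have hdnot : d ∉ pvDigs n' := by
            intro hc
            have := hall d hc
            rw [hor d hd0 hd10] at this
            simp at this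
          refine ⟨List.nodup_cons.mpr ⟨hdnot, hnd⟩, ?_⟩
          intro e he
          rcases List.mem_cons.mp he with rfl | he'
          · simpa using hz
          · obtain ⟨he0, he10⟩ := pvDigs_mem_bounds n' e he'
            have := hall e he'
            rw [hor e he0 he10] at this
            simpa using (Bool.or_eq_false_iff.mp this).1
        · rintro ⟨hnd, hall⟩
          obtain ⟨hdnot, hnd'⟩ := List.nodup_cons.mp hnd
          refine ⟨hnd', ?_⟩
          intro e he'
          obtain ⟨he0, he10⟩ := pvDigs_mem_bounds n' e he'
          have hne : e ≠ d := fun hc => hdnot (hc ▸ he')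
          rw [hor e he0 he10]
          simp [hne, hall e (List.mem_cons_of_mem _ he')]
    · simp

-- ===== VERDICT (by name: the statement is the Claim_ definition above) =====
theorem check_room_num_spec : Claim_equal_check_room_num := by
  intro n _
  unfold Spec_check_room_num check_room_num check_room_num_alt
  have h1 : checkRoomLoopA n (List.replicate 10 0) = true ↔ (pvDigs n).Nodup := by
    rw [checkRoomLoopA_char n (List.replicate 10 0) (by simp) (by simp)]
    exact ⟨fun h => h.1, fun h => ⟨h, fun d _ => pvGetD_replicate_zero d⟩⟩
  have h2 : goB n 0 = true ↔ (pvDigs n).Nodup := by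
    rw [goB_char n 0]
    exact ⟨fun h => h.1, fun h => ⟨h, fun d _ => Nat.zero_testBit _⟩⟩
  exact Bool.eq_iff_iff.mpr (h1.trans h2.symm)
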